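-- pv_equiv track=rewrite | github.com/karayanni/NAZAR-System | TuningPlanner/TuningPlanner.py | get_ordered_dic
-- ===== SOURCE A (Python) =====
-- from collections import OrderedDict
-- from itertools import chain, combinations
--
-- def index_of(x, e_list_param):
--     try:
--         return len(x), e_list_param.index(x)
--     except:
--         return float('inf'), len(e_list_param)
--
-- def powerset(iterable):
--     """
--     powerset([1,2,3]) --> () (1,) (2,) (3,) (1,2) (1,3) (2,3) (1,2,3)
--     :param iterable: the set to get the power sets of
--     :return: a list of all the possible subsets
--     """
--     s = list(iterable)
--     return list(chain.from_iterable(combinations(s, r) for r in range(1, len(s) + 1)))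
--
-- def get_ordered_dic(e_list_param):
--     finetune_dir = OrderedDict()
--     for i in e_list_param:
--         i_powersets = [j for j in powerset(i) if j in e_list_param]
--         if len(i_powersets) != 1:
--             i_powersets.remove(i)
--             i_powersets = sorted(i_powersets, key=lambda x: index_of(x, e_list_param))
--
--         if i_powersets[0] in finetune_dir:
--             if i not in finetune_dir[i_powersets[0]] and i != i_powersets[0]:
--                 finetune_dir[i_powersets[0]].append(i)
--         else:
--             if i != i_powersets[0]:
--                 finetune_dir[i_powersets[0]] = [i]
--             else:
--                 finetune_dir[i_powersets[0]] = []
--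
--     for k in finetune_dir.keys():
--         if not finetune_dir[k]:
--             finetune_dir[k] = [k]
--
--     return finetune_dir
-- ===== SOURCE B (Python) =====
-- def get_ordered_dic(e_list_param):
--     # For each element, scan the list itself for contained subsequences instead of
--     # enumerating the element's powerset: pick the smallest one by (length, first index)
--     # using a precomputed first-index dict.
--     def is_subseq(x, y):
--         it = iter(y)
--         return all(e in it for e in x)
--
--     pos = {}
--     for idx, e in enumerate(e_list_param):
--         pos.setdefault(tuple(e), idx)
--
--     groups = {}
--     for i in e_list_param:
--         best = None  # ((len, first index), element)
--         for x in e_list_param: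
--             if x != i and len(x) > 0 and is_subseq(x, i):
--                 k = (len(x), pos[tuple(x)])
--                 if best is None or k < best[0]:
--                     best = (k, x)
--         key = tuple(best[1]) if best is not None else tuple(i)
--         grp = groups.setdefault(key, [])
--         if i != key and i not in grp:
--             grp.append(i)
--
--     return {k: (v if v else [k]) for k, v in groups.items()}
-- ===== Notes on version B (the rewrite author's own statement) =====
-- stated objective: faster
-- what changed: B drops the powerset enumeration entirely: instead of generating all 2^|i|-1 subsets of each element and testing each for membership, it scans the list itself once per element testing subsequence containment, taking the minimum by (length, first index) via a precomputed first-index dict.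
-- crash fix: On inputs containing the empty tuple A raises ValueError (its powerset list is empty, so i_powersets.remove(i) fails); B returns the grouping with the empty tuple grouped under itself. — e.g. on get_ordered_dic([[], [1]]): A raises ValueError, B returns [([], [[]]), ([1], [[1]])]
import Mathlib
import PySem

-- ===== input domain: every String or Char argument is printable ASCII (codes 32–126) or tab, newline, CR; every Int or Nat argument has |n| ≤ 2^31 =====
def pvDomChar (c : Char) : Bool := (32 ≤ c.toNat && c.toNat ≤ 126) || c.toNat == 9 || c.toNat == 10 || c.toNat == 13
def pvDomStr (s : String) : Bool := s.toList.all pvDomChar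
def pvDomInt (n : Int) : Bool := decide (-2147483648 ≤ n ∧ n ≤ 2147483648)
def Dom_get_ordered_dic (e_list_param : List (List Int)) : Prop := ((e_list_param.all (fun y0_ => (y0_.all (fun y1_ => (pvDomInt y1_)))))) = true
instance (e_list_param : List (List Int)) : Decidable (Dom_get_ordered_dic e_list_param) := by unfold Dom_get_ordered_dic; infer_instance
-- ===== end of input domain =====

-- B replaces A's per-element powerset enumeration (exponential in the element's length)
-- with a direct scan of the list for contained subsequences, picking the minimal one by
-- (length, first index) via a precomputed first-index dict; same values, same order.


-- ===== PORT A =====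
-- itertools.combinations(s, r): the r-element subsequences, in itertools order
def pvCombinations (s : List Int) (r : Nat) : List (List Int) :=
  match s, r with
  | _, 0 => [[]]
  | [], _ + 1 => []
  | x :: xs, r + 1 => (pvCombinations xs r).map (x :: ·) ++ pvCombinations xs (r + 1)
termination_by s.length

-- powerset(s): chain(combinations(s, r) for r in range(1, len(s)+1))
def pvPowerset (s : List Int) : List (List Int) :=
  (List.range' 1 s.length).flatMap (fun r => pvCombinations s r)

-- index_of(x, e_list_param): (len(x), index) or, on ValueError, (inf, len).
-- float('inf') is modelled by 2^62, which exceeds every length that can occur here.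
def pvIndexOf (x : List Int) (e_list : List (List Int)) : Int × Int :=
  match PySem.List.index? e_list x with
  | some idx => ((x.length : Int), (idx : Int))
  | none => ((2 ^ 62 : Int), (e_list.length : Int))

-- A's key-selection lines for one i (none = the ValueError of `.remove(i)`)
def pvSelectKey (e_list_param : List (List Int)) (i : List Int) : Option (List Int) :=
  let i_powersets := (pvPowerset i).filter (fun j => e_list_param.contains j)
  let i_powersets? : Option (List (List Int)) :=
    if i_powersets.length ≠ 1 then
      (PySem.List.remove? i_powersets i).map (fun l =>
        PySem.List.sorted2 l (fun x => (pvIndexOf x e_list_param).1)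
                             (fun x => (pvIndexOf x e_list_param).2))
    else some i_powersets
  i_powersets?.bind (fun ips => PySem.List.pyGet? ips 0)

-- one iteration of A's main loop (none propagates the raise)
def pvStepA (e_list_param : List (List Int))
    (acc : Option (PySem.Dict (List Int) (List (List Int)))) (i : List Int) :
    Option (PySem.Dict (List Int) (List (List Int))) :=
  acc.bind fun finetune_dir =>
    (pvSelectKey e_list_param i).map fun key =>
      if finetune_dir.contains key then
        if ¬ (finetune_dir.getD key []).contains i ∧ i ≠ key then
          finetune_dir.insert key ((finetune_dir.getD key []) ++ [i])
        else finetune_dir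
      else
        if i ≠ key then finetune_dir.insert key [i]
        else finetune_dir.insert key []

def get_ordered_dic (e_list_param : List (List Int)) : List (List Int × List (List Int)) :=
  match e_list_param.foldl (pvStepA e_list_param) (some PySem.Dict.empty) with
  | none => []   -- Python raises ValueError here; excluded by Pre_get_ordered_dic
  | some d =>
    -- for k in finetune_dir.keys(): empty groups become [k]
    (d.keys.foldl (fun d' k => if (d'.getD k []).isEmpty then d'.insert k [k] else d') d).items

-- ===== PORT B =====
-- is_subseq(x, y): greedy scan, the same consumption as Python's iterator membership
def pvIsSubseq (x y : List Int) : Bool :=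
  match y with
  | [] => x.isEmpty
  | b :: bs =>
    match x with
    | [] => true
    | a :: as_ => if a = b then pvIsSubseq as_ bs else pvIsSubseq (a :: as_) bs

-- pos: first index of each distinct element (dict.setdefault over enumerate)
def pvPos (e_list_param : List (List Int)) : PySem.Dict (List Int) Int :=
  (PySem.List.enumerate e_list_param).foldl
    (fun d p => if d.contains p.2 then d else d.insert p.2 p.1) PySem.Dict.empty

-- Python's tuple comparison k < best[0]
def pvLexLt (a b : Int × Int) : Bool :=
  a.1 < b.1 ∨ (a.1 = b.1 ∧ a.2 < b.2)

-- inner scan: minimal proper nonempty contained subsequence by (len, first index)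
def pvBest (e_list_param : List (List Int)) (pos : PySem.Dict (List Int) Int)
    (i : List Int) : Option ((Int × Int) × List Int) :=
  e_list_param.foldl (fun best x =>
    if x ≠ i ∧ x ≠ [] ∧ pvIsSubseq x i then
      let k : Int × Int := ((x.length : Int), pos.getD x 0)  -- x ∈ e_list_param, so present
      match best with
      | none => some (k, x)
      | some (bk, _) => if pvLexLt k bk then some (k, x) else best
    else best) none

def pvStepB (e_list_param : List (List Int)) (pos : PySem.Dict (List Int) Int)
    (groups : PySem.Dict (List Int) (List (List Int))) (i : List Int) :
    PySem.Dict (List Int) (List (List Int)) :=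
  let key := match pvBest e_list_param pos i with
    | some (_, bx) => bx
    | none => i
  let groups1 := if groups.contains key then groups else groups.insert key []  -- setdefault
  let grp := groups1.getD key []
  if i ≠ key ∧ ¬ grp.contains i then groups1.insert key (grp ++ [i]) else groups1

def get_ordered_dic_alt (e_list_param : List (List Int)) : List (List Int × List (List Int)) :=
  let pos := pvPos e_list_param
  let groups := e_list_param.foldl (pvStepB e_list_param pos) PySem.Dict.empty
  groups.items.map (fun kv => (kv.1, if kv.2.isEmpty then [kv.1] else kv.2))

-- ===== PRECONDITION & SPEC =====
-- A raises ValueError exactly when the empty tuple is an element (its powerset list is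
-- then empty and `.remove(i)` fails); Pre_ excludes exactly those inputs.
def Pre_get_ordered_dic (e_list_param : List (List Int)) : Prop :=
  ([] : List Int) ∉ e_list_param
instance (e_list_param : List (List Int)) : Decidable (Pre_get_ordered_dic e_list_param) := by
  unfold Pre_get_ordered_dic; infer_instance
def pvWitness_get_ordered_dic : List (List Int) := [[1], [1, 2], [2, 3]]

-- On inputs containing the empty tuple A raises ValueError; B returns the intended
-- grouping, the empty tuple grouped under itself.
def Raises_get_ordered_dic (e_list_param : List (List Int)) : Prop :=
  ([] : List Int) ∈ e_list_param
instance (e_list_param : List (List Int)) : Decidable (Raises_get_ordered_dic e_list_param) := by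
  unfold Raises_get_ordered_dic; infer_instance
def pvRaiseWitness_get_ordered_dic : List (List Int) := [[], [1]]
def pvRaiseWitnessOut_get_ordered_dic : List (List Int × List (List Int)) :=
  [([], [[]]), ([1], [[1]])]

def Spec_get_ordered_dic (e_list_param : List (List Int)) (out : List (List Int × List (List Int))) : Prop := out = get_ordered_dic_alt e_list_param
instance (e_list_param : List (List Int)) (out : List (List Int × List (List Int))) : Decidable (Spec_get_ordered_dic e_list_param out) := by unfold Spec_get_ordered_dic; infer_instance

-- ===== CLAIM (what is proved, stated in full; the proofs are below) =====
def Claim_equal_get_ordered_dic : Prop := ∀ (e_list_param : List (List Int)), Dom_get_ordered_dic e_list_param → Pre_get_ordered_dic e_list_param → Spec_get_ordered_dic e_list_param (get_ordered_dic e_list_param)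
def Claim_raises_get_ordered_dic : Prop := (∀ (e_list_param : List (List Int)), Dom_get_ordered_dic e_list_param → Raises_get_ordered_dic e_list_param → ¬ Pre_get_ordered_dic e_list_param) ∧ (Dom_get_ordered_dic (pvRaiseWitness_get_ordered_dic) ∧ Raises_get_ordered_dic (pvRaiseWitness_get_ordered_dic) ∧ get_ordered_dic_alt (pvRaiseWitness_get_ordered_dic) = pvRaiseWitnessOut_get_ordered_dic)

-- ===== LEMMAS AND PROOFS =====

-- ---- combinations / powerset ----
theorem mem_pvCombinations (s : List Int) (r : Nat) (x : List Int) :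
    x ∈ pvCombinations s r ↔ x.Sublist s ∧ x.length = r := by
  induction s generalizing r x with
  | nil =>
    cases r with
    | zero => simp [pvCombinations, List.sublist_nil, List.length_eq_zero_iff]
    | succ r =>
      simp only [pvCombinations, List.not_mem_nil, false_iff, not_and]
      intro h hl
      rw [List.sublist_nil] at h
      simp [h] at hl
  | cons a as ih =>
    cases r with
    | zero =>
      simp [pvCombinations, List.length_eq_zero_iff]
      intro h; subst h; exact List.nil_sublist _
    | succ r =>
      simp only [pvCombinations, List.mem_append, List.mem_map, ih]
      constructor
      · rintro (⟨y, ⟨hy, hly⟩, rfl⟩ | ⟨hx, hl⟩)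
        · exact ⟨List.cons_sublist_cons.mpr hy, by simp [hly]⟩
        · exact ⟨hx.trans (List.sublist_cons_self a as), hl⟩
      · rintro ⟨hs, hl⟩
        rcases List.sublist_cons_iff.mp hs with h | ⟨t, rfl, ht⟩
        · exact Or.inr ⟨h, hl⟩
        · exact Or.inl ⟨t, ⟨ht, by simpa using hl⟩, rfl⟩

theorem pvCombinations_eq_nil (s : List Int) (r : Nat) (h : s.length < r) :
    pvCombinations s r = [] := by
  rw [List.eq_nil_iff_forall_not_mem]
  intro x hx
  rcases (mem_pvCombinations s r x).mp hx with ⟨hs, hl⟩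
  have := hs.length_le
  omega

theorem pvCombinations_full (s : List Int) : pvCombinations s s.length = [s] := by
  induction s with
  | nil => simp [pvCombinations]
  | cons a as ih =>
    show pvCombinations (a :: as) (as.length + 1) = [a :: as]
    rw [pvCombinations]
    rw [ih, pvCombinations_eq_nil as (as.length + 1) (by omega)]
    rfl

theorem count_flatMap (rs : List Nat) (f : Nat → List (List Int)) (a : List Int) :
    ((rs.flatMap f).count a) = (rs.map (fun r => (f r).count a)).sum := by
  induction rs with
  | nil => rfl
  | cons r rs ih => simp [List.flatMap_cons, List.count_append, ih]

theorem count_self_pvPowerset (s : List Int) (hs : s ≠ []) :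
    (pvPowerset s).count s = 1 := by
  unfold pvPowerset
  rw [count_flatMap]
  obtain ⟨m, hm⟩ : ∃ m, s.length = m + 1 := ⟨s.length - 1, by cases s <;> simp_all⟩
  rw [hm, List.range'_concat]
  have hlast : (1 + 1 * m) = m + 1 := by omega
  rw [List.map_append, List.sum_append]
  have h1 : ∀ r ∈ List.range' 1 m, (pvCombinations s r).count s = 0 := by
    intro r hr
    rw [List.mem_range'_1] at hr
    rw [List.count_eq_zero]
    intro hmem
    rcases (mem_pvCombinations s r s).mp hmem with ⟨_, hl⟩
    omega
  have : (List.range' 1 m).map (fun r => (pvCombinations s r).count s) =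
      (List.range' 1 m).map (fun _ => 0) := List.map_congr_left h1
  rw [this]
  have h2 : 1 + m = s.length := by omega
  simp [h2, pvCombinations_full]

theorem mem_pvPowerset (s x : List Int) :
    x ∈ pvPowerset s ↔ x ≠ [] ∧ x.Sublist s := by
  unfold pvPowerset
  simp only [List.mem_flatMap, List.mem_range'_1, mem_pvCombinations]
  constructor
  · rintro ⟨r, ⟨h1, h2⟩, hs, hl⟩
    exact ⟨by intro h; subst h; simp at hl; omega, hs⟩
  · rintro ⟨hne, hs⟩
    refine ⟨x.length, ⟨?_, ?_⟩, hs, rfl⟩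
    · cases x <;> simp_all
    · have := hs.length_le; omega

-- ---- is_subseq is Sublist ----
theorem pvIsSubseq_iff (x y : List Int) : pvIsSubseq x y = true ↔ x.Sublist y := by
  induction y generalizing x with
  | nil => cases x <;> simp [pvIsSubseq]
  | cons b bs ih =>
    cases x with
    | nil => simp [pvIsSubseq, List.nil_sublist]
    | cons a as =>
      by_cases hab : a = b
      · subst hab
        have hu : pvIsSubseq (a::as) (a::bs) = pvIsSubseq as bs := by simp [pvIsSubseq]
        rw [hu, ih, ← List.cons_sublist_cons (a := a)]
      · have hu : pvIsSubseq (a::as) (b::bs) = pvIsSubseq (a::as) bs := by simp [pvIsSubseq, hab]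
        rw [hu, ih]
        constructor
        · exact fun h => h.trans (List.sublist_cons_self b bs)
        · intro h
          rcases List.sublist_cons_iff.mp h with h' | ⟨t, he, ht⟩
          · exact h'
          · exact absurd (by cases he; rfl) hab

-- ---- pos is the first index ----
theorem pos_fold_get? (l : List (List Int)) (s : Int) (d : PySem.Dict (List Int) Int)
    (x : List Int) :
    ((PySem.List.enumerate l s).foldl
        (fun d p => if d.contains p.2 then d else d.insert p.2 p.1) d).get? x =
      match d.get? x with
      | some v => some v
      | none => (PySem.List.index? l x).map (fun n => s + (n : Int)) := by
  induction l generalizing s d with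
  | nil =>
    simp [PySem.List.enumerate_nil]
    cases d.get? x <;> simp
  | cons y ys ih =>
    rw [PySem.List.enumerate_cons, List.foldl_cons, ih]
    by_cases hxy : x = y
    · subst hxy
      by_cases hc : d.contains x = true
      · simp only [hc, if_true]
        have : ∃ v, d.get? x = some v := by
          rw [PySem.Dict.contains_eq_isSome_get?] at hc
          exact Option.isSome_iff_exists.mp hc
        obtain ⟨v, hv⟩ := this
        simp [hv]
      · simp only [hc]
        have hg : d.get? x = none := by
          rw [PySem.Dict.contains_eq_isSome_get?] at hc
          exact Option.not_isSome_iff_eq_none.mp hc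
        rw [PySem.List.index?_cons_self]
        simp [hg]
    · have hyx : y ≠ x := fun h => hxy h.symm
      have hidx : PySem.List.index? (y :: ys) x = (PySem.List.index? ys x).map (· + 1) :=
        PySem.List.index?_cons_of_ne ys hyx
      by_cases hc : d.contains y = true
      · simp only [hc, if_true, hidx]
        cases d.get? x <;> cases PySem.List.index? ys x <;> simp <;> ring
      · have hne : (d.insert y s).get? x = d.get? x := PySem.Dict.get?_insert_of_ne d s hxy
        simp only [if_neg hc, hne, hidx]
        cases d.get? x <;> cases PySem.List.index? ys x <;> simp <;> ring

theorem pvPos_get? (e : List (List Int)) (x : List Int) :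
    (pvPos e).get? x = (PySem.List.index? e x).map (fun n => (n : Int)) := by
  unfold pvPos
  rw [pos_fold_get?]
  simp [PySem.Dict.get?_empty]

-- the key both programs order by, for an element of e
theorem pvIndexOf_eq_keyB (e : List (List Int)) (x : List Int) (hx : x ∈ e) :
    pvIndexOf x e = ((x.length : Int), (pvPos e).getD x 0) := by
  have hs : ∃ n, PySem.List.index? e x = some n := by
    rw [← Option.isSome_iff_exists, PySem.List.index?_isSome_iff]; exact hx
  obtain ⟨n, hn⟩ := hs
  rw [pvIndexOf, hn, PySem.Dict.getD_eq_get?_getD, pvPos_get?, hn]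
  rfl

theorem pvIndexOf_inj (e : List (List Int)) (x y : List Int) (hx : x ∈ e) (hy : y ∈ e)
    (h : pvIndexOf x e = pvIndexOf y e) : x = y := by
  obtain ⟨n, hn⟩ : ∃ n, PySem.List.index? e x = some n := by
    rw [← Option.isSome_iff_exists, PySem.List.index?_isSome_iff]; exact hx
  obtain ⟨m, hm⟩ : ∃ m, PySem.List.index? e y = some m := by
    rw [← Option.isSome_iff_exists, PySem.List.index?_isSome_iff]; exact hy
  rw [pvIndexOf, pvIndexOf, hn, hm] at h
  have hnm : n = m := by
    have := congrArg Prod.snd h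
    simpa using this
  subst hnm
  obtain ⟨hk, hxk, -⟩ := PySem.List.getElem_of_index?_eq_some hn
  obtain ⟨hk', hyk, -⟩ := PySem.List.getElem_of_index?_eq_some hm
  rw [← hxk, ← hyk]

-- ---- Python's tuple order is the lexicographic order ----
theorem pvLexLt_eq_decide_toLex (a b : Int × Int) :
    pvLexLt a b = decide (toLex a < toLex b) := by
  rw [pvLexLt]
  by_cases h1 : a.1 < b.1 <;> by_cases h2 : a.1 = b.1 <;> by_cases h3 : a.2 < b.2 <;>
    simp [Prod.Lex.lt_iff, h1, h2, h3]

theorem sorted2_eq_sorted_toLex (xs : List (List Int)) (k1 k2 : List Int → Int) :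
    PySem.List.sorted2 xs k1 k2 false =
      PySem.List.sorted xs (fun x => toLex (k1 x, k2 x)) false := by
  have hb : (fun a b => decide (k1 a < k1 b) || (!decide (k1 b < k1 a) && decide (k2 a < k2 b)))
      = fun (a b : List Int) => decide (toLex (k1 a, k2 a) < toLex (k1 b, k2 b)) := by
    funext a b
    have h := pvLexLt_eq_decide_toLex (k1 a, k2 a) (k1 b, k2 b)
    rw [pvLexLt] at h
    rw [← h]
    by_cases h1 : k1 a < k1 b <;> by_cases h2 : k1 a = k1 b <;> by_cases h3 : k2 a < k2 b <;>
      simp [h1, h2, h3] <;> omega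
  unfold PySem.List.sorted2 PySem.List.sorted
  simp only [if_neg (by decide : ¬ (false = true)), hb]

-- ---- pvBest characterisation ----
theorem pvLexLt_self (a : Int × Int) : pvLexLt a a = false := by
  simp [pvLexLt]

theorem pvLexLt_trans {a b c : Int × Int} (h1 : pvLexLt a b = true)
    (h2 : pvLexLt b c = true) : pvLexLt a c = true := by
  simp only [pvLexLt, decide_eq_true_eq] at *
  rcases h1 with h1 | ⟨h1a, h1b⟩ <;> rcases h2 with h2 | ⟨h2a, h2b⟩ <;> omega

theorem pvBest_fold (pos : PySem.Dict (List Int) Int)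
    (i : List Int) (l : List (List Int)) :
    (l.foldl (fun best x =>
      if x ≠ i ∧ x ≠ [] ∧ pvIsSubseq x i then
        let k : Int × Int := ((x.length : Int), pos.getD x 0)
        match best with
        | none => some (k, x)
        | some (bk, _) => if pvLexLt k bk then some (k, x) else best
      else best) none = none ∧ ∀ x ∈ l, ¬ (x ≠ i ∧ x ≠ [] ∧ pvIsSubseq x i = true)) ∨
    (∃ x ∈ l, (x ≠ i ∧ x ≠ [] ∧ pvIsSubseq x i = true) ∧
      (l.foldl (fun best x =>
      if x ≠ i ∧ x ≠ [] ∧ pvIsSubseq x i then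
        let k : Int × Int := ((x.length : Int), pos.getD x 0)
        match best with
        | none => some (k, x)
        | some (bk, _) => if pvLexLt k bk then some (k, x) else best
      else best) none) = some (((x.length : Int), pos.getD x 0), x) ∧
      ∀ y ∈ l, (y ≠ i ∧ y ≠ [] ∧ pvIsSubseq y i = true) →
        ¬ pvLexLt ((y.length : Int), pos.getD y 0) ((x.length : Int), pos.getD x 0) = true) := by
  induction l using List.reverseRecOn with
  | nil => left; simp
  | append_singleton l z ih =>
    rw [List.foldl_append] at *
    simp only [List.foldl_cons, List.foldl_nil]
    by_cases hz : z ≠ i ∧ z ≠ [] ∧ pvIsSubseq z i = true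
    · rcases ih with ⟨hnone, hall⟩ | ⟨x, hx, hcx, hsome, hmin⟩
      · right
        refine ⟨z, by simp, hz, ?_, ?_⟩
        · rw [hnone]; simp [if_pos hz]
        · intro y hy hcy
          rcases List.mem_append.mp hy with hy | hy
          · exact absurd hcy (hall y hy)
          · simp at hy; subst hy; simp [pvLexLt_self]
      · rw [hsome]
        by_cases hlt : pvLexLt ((z.length : Int), pos.getD z 0) ((x.length : Int), pos.getD x 0) = true
        · right
          refine ⟨z, by simp, hz, ?_, ?_⟩
          · simp [if_pos hz, hlt]
          · intro y hy hcy
            rcases List.mem_append.mp hy with hy | hy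
            · intro hlt2
              exact hmin y hy hcy (pvLexLt_trans hlt2 hlt)
            · simp at hy; subst hy; simp [pvLexLt_self]
        · right
          refine ⟨x, List.mem_append.mpr (Or.inl hx), hcx, ?_, ?_⟩
          · simp [if_neg hlt]
          · intro y hy hcy
            rcases List.mem_append.mp hy with hy | hy
            · exact hmin y hy hcy
            · simp at hy; subst hy; exact hlt
    · rcases ih with ⟨hnone, hall⟩ | ⟨x, hx, hcx, hsome, hmin⟩
      · left
        rw [hnone]
        refine ⟨by simp [if_neg hz], ?_⟩
        intro y hy
        rcases List.mem_append.mp hy with hy | hy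
        · exact hall y hy
        · simp at hy; subst hy; exact hz
      · right
        refine ⟨x, List.mem_append.mpr (Or.inl hx), hcx, ?_, ?_⟩
        · rw [hsome]; simp [if_neg hz]
        · intro y hy hcy
          rcases List.mem_append.mp hy with hy | hy
          · exact hmin y hy hcy
          · simp at hy; subst hy; exact absurd hcy hz

theorem pvBest_spec (e : List (List Int)) (i : List Int) :
    (pvBest e (pvPos e) i = none ∧
      ∀ x ∈ e, ¬ (x ≠ i ∧ x ≠ [] ∧ pvIsSubseq x i = true)) ∨
    (∃ x ∈ e, (x ≠ i ∧ x ≠ [] ∧ pvIsSubseq x i = true) ∧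
      pvBest e (pvPos e) i = some (((x.length : Int), (pvPos e).getD x 0), x) ∧
      ∀ y ∈ e, (y ≠ i ∧ y ≠ [] ∧ pvIsSubseq y i = true) →
        ¬ pvLexLt ((y.length : Int), (pvPos e).getD y 0)
                  ((x.length : Int), (pvPos e).getD x 0) = true) := by
  exact pvBest_fold (pvPos e) i e

-- ---- both programs select the same key ----
theorem pyGet?_zero_cons (a : List Int) (l : List (List Int)) :
    PySem.List.pyGet? (a :: l) 0 = some a := by
  simp [PySem.List.pyGet?, PySem.List.pyIdx?]

theorem selectKey_eq (e : List (List Int)) (he : ([] : List Int) ∉ e)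
    (i : List Int) (hi : i ∈ e) :
    pvSelectKey e i = some (match pvBest e (pvPos e) i with
      | some (_, bx) => bx
      | none => i) := by
  have hine : i ≠ [] := fun h => he (h ▸ hi)
  set L := (pvPowerset i).filter (fun j => e.contains j) with hLdef
  have memL : ∀ x, x ∈ L ↔ (x ≠ [] ∧ x.Sublist i) ∧ x ∈ e := by
    intro x
    rw [hLdef, List.mem_filter, mem_pvPowerset, List.contains_iff_mem]
  have hiL : i ∈ L := (memL i).mpr ⟨⟨hine, List.Sublist.refl i⟩, hi⟩
  have hcand : ∀ x, (x ∈ e ∧ (x ≠ i ∧ x ≠ [] ∧ pvIsSubseq x i = true)) ↔ (x ∈ L ∧ x ≠ i) := by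
    intro x
    rw [memL, pvIsSubseq_iff]
    tauto
  by_cases hL1 : L.length = 1
  · -- L = [i]: A keeps the branch, B finds no candidate
    obtain ⟨a, ha⟩ := List.length_eq_one_iff.mp hL1
    have hai : a = i := by rw [ha] at hiL; exact (by simpa using hiL : i = a).symm
    rw [hai] at ha
    have hbest : pvBest e (pvPos e) i = none := by
      rcases pvBest_spec e i with ⟨hn, -⟩ | ⟨x, hx, hcx, -, -⟩
      · exact hn
      · exfalso
        have hxL := (hcand x).mp ⟨hx, hcx⟩
        rw [ha] at hxL
        rcases hxL with ⟨hmem, hne⟩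
        simp only [List.mem_singleton] at hmem
        exact hne hmem
    rw [hbest]
    show pvSelectKey e i = some i
    simp only [pvSelectKey]
    rw [← hLdef, if_neg (not_not_intro hL1), ha, Option.bind_some]
    exact pyGet?_zero_cons i []
  · -- L has another member: A sorts L.erase i, B scans the list for the same minimum
    have hcount : L.count i = 1 := by
      rw [hLdef, List.count_filter (by rw [List.contains_iff_mem]; exact hi)]
      exact count_self_pvPowerset i hine
    have hM : ∀ x, x ∈ L.erase i ↔ x ∈ L ∧ x ≠ i := by
      intro x
      constructor
      · intro hx
        refine ⟨List.mem_of_mem_erase hx, ?_⟩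
        rintro rfl
        have h0 : (L.erase x).count x = 0 := by rw [List.count_erase_self, hcount]
        exact (List.count_eq_zero.mp h0) hx
      · rintro ⟨hxL, hne⟩
        exact (List.mem_erase_of_ne hne).mpr hxL
    have hLpos : 0 < L.length := List.length_pos_of_mem hiL
    have hMlen : 1 ≤ (L.erase i).length := by
      rw [List.length_erase_of_mem hiL]; omega
    have hrem : PySem.List.remove? L i = some (L.erase i) :=
      PySem.List.remove?_eq_some_erase L i hiL
    set keyf : List Int → Lex (Int × Int) :=
      fun x => toLex ((pvIndexOf x e).1, (pvIndexOf x e).2) with hkeyf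
    have hsorted2 : PySem.List.sorted2 (L.erase i)
        (fun x => (pvIndexOf x e).1) (fun x => (pvIndexOf x e).2) false =
        PySem.List.sorted (L.erase i) keyf false :=
      sorted2_eq_sorted_toLex (L.erase i) _ _
    obtain ⟨m, t, hmt⟩ : ∃ m t, PySem.List.sorted (L.erase i) keyf false = m :: t := by
      cases hs : PySem.List.sorted (L.erase i) keyf false with
      | nil =>
        exfalso
        have hlen := PySem.List.length_sorted (L.erase i) keyf false
        rw [hs] at hlen
        simp at hlen
        omega
      | cons m t => exact ⟨m, t, rfl⟩
    have hmm : m ∈ L.erase i := by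
      have : m ∈ PySem.List.sorted (L.erase i) keyf false := by rw [hmt]; exact List.mem_cons_self
      exact (PySem.List.mem_sorted _ _ _ m).mp this
    have hmin_m : ∀ y ∈ L.erase i, keyf m ≤ keyf y :=
      PySem.List.key_head_sorted_le (L.erase i) keyf hmt
    have hmLe := (hcand m).mpr ((hM m).mp hmm)
    rcases pvBest_spec e i with ⟨hn, hall⟩ | ⟨x, hx, hcx, hbest, hmin⟩
    · exact absurd hmLe.2 (hall m hmLe.1)
    · have hxM : x ∈ L.erase i := (hM x).mpr ((hcand x).mp ⟨hx, hcx⟩)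
      have hkm : pvIndexOf m e = ((m.length : Int), (pvPos e).getD m 0) :=
        pvIndexOf_eq_keyB e m hmLe.1
      have hkx : pvIndexOf x e = ((x.length : Int), (pvPos e).getD x 0) :=
        pvIndexOf_eq_keyB e x hx
      have e1 : keyf m = toLex ((m.length : Int), (pvPos e).getD m 0) := by
        simp only [hkeyf, Prod.mk.eta, hkm]
      have e2 : keyf x = toLex ((x.length : Int), (pvPos e).getD x 0) := by
        simp only [hkeyf, Prod.mk.eta, hkx]
      have h1 : keyf m ≤ keyf x := hmin_m x hxM
      have h2 : keyf x ≤ keyf m := by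
        have hnlt := hmin m hmLe.1 hmLe.2
        rw [pvLexLt_eq_decide_toLex] at hnlt
        simp only [decide_eq_true_eq] at hnlt
        rw [e1, e2]
        exact not_lt.mp hnlt
      have hmx : m = x := by
        refine pvIndexOf_inj e m x hmLe.1 hx ?_
        have heq : keyf m = keyf x := le_antisymm h1 h2
        simp only [hkeyf, Prod.mk.eta] at heq
        exact toLex_inj.mp heq
      rw [hbest]
      show pvSelectKey e i = some x
      simp only [pvSelectKey]
      rw [← hLdef, if_pos hL1, hrem, Option.map_some, Option.bind_some, hsorted2, hmt,
        pyGet?_zero_cons, hmx]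

-- ---- step and fold equality ----
theorem stepA_eq_stepB (e : List (List Int)) (he : ([] : List Int) ∉ e)
    (g : PySem.Dict (List Int) (List (List Int))) (i : List Int) (hi : i ∈ e) :
    pvStepA e (some g) i = some (pvStepB e (pvPos e) g i) := by
  simp only [pvStepA, Option.bind_some]
  rw [selectKey_eq e he i hi, Option.map_some]
  congr 1
  simp only [pvStepB]
  set k := (match pvBest e (pvPos e) i with
    | some (_, bx) => bx
    | none => i) with hk
  by_cases hc : g.contains k = true
  · simp only [hc, if_true]
    by_cases h1 : i = k <;> by_cases h2 : (g.getD k []).contains i = true <;>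
      simp [h1, h2]
  · simp only [hc, if_neg hc, Bool.false_eq_true, if_false]
    by_cases h1 : i = k
    · simp [h1, PySem.Dict.getD_insert_self]
    · simp only [PySem.Dict.getD_insert_self, h1, ne_eq, not_false_iff, List.contains_nil,
        Bool.false_eq_true, not_false_eq_true, and_true, if_true, true_and,
        PySem.Dict.insert_insert_self, List.nil_append]

theorem foldA_eq_foldB (e : List (List Int)) (he : ([] : List Int) ∉ e)
    (l : List (List Int)) (hl : ∀ x ∈ l, x ∈ e)
    (g : PySem.Dict (List Int) (List (List Int))) :
    l.foldl (pvStepA e) (some g) = some (l.foldl (pvStepB e (pvPos e)) g) := by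
  induction l generalizing g with
  | nil => rfl
  | cons x xs ih =>
    rw [List.foldl_cons, List.foldl_cons, stepA_eq_stepB e he g x (hl x List.mem_cons_self)]
    exact ih (fun y hy => hl y (List.mem_cons_of_mem x hy)) _

theorem nodup_keys_stepB (e : List (List Int)) (pos : PySem.Dict (List Int) Int)
    (g : PySem.Dict (List Int) (List (List Int))) (i : List Int)
    (hg : g.keys.Nodup) : (pvStepB e pos g i).keys.Nodup := by
  simp only [pvStepB]
  split_ifs <;>
    first
      | exact hg
      | exact PySem.Dict.nodup_keys_insert _ _ _ hg
      | exact PySem.Dict.nodup_keys_insert _ _ _ (PySem.Dict.nodup_keys_insert _ _ _ hg)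

theorem nodup_keys_foldB (e : List (List Int)) (pos : PySem.Dict (List Int) Int)
    (l : List (List Int)) (g : PySem.Dict (List Int) (List (List Int)))
    (hg : g.keys.Nodup) : (l.foldl (pvStepB e pos) g).keys.Nodup := by
  induction l generalizing g with
  | nil => exact hg
  | cons x xs ih => exact ih _ (nodup_keys_stepB e pos g x hg)

-- ---- the final fix-up loop is the items map ----
theorem fixup_items (ks : List (List Int)) (d : PySem.Dict (List Int) (List (List Int)))
    (hnd : d.keys.Nodup) (hks : ks.Nodup) (hsub : ∀ k ∈ ks, d.contains k = true) :
    (ks.foldl (fun d' k => if (d'.getD k []).isEmpty then d'.insert k [k] else d') d).items =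
      d.items.map (fun kv => if kv.1 ∈ ks ∧ kv.2.isEmpty then (kv.1, [kv.1]) else kv) := by
  induction ks generalizing d with
  | nil =>
    simp
  | cons k ks ih =>
    have hcontk : d.contains k = true := hsub k List.mem_cons_self
    have hkks : k ∉ ks := (List.nodup_cons.mp hks).1
    have hksnd : ks.Nodup := (List.nodup_cons.mp hks).2
    rw [List.foldl_cons]
    by_cases hemp : (d.getD k []).isEmpty
    · rw [if_pos hemp]
      have hnd1 : (d.insert k [k]).keys.Nodup := PySem.Dict.nodup_keys_insert _ _ _ hnd
      have hsub1 : ∀ k' ∈ ks, (d.insert k [k]).contains k' = true := by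
        intro k' hk'
        rw [PySem.Dict.contains_insert]
        simp [hsub k' (List.mem_cons_of_mem k hk')]
      rw [ih (d.insert k [k]) hnd1 hksnd hsub1,
        PySem.Dict.items_insert_of_contains d [k] hcontk, List.map_map]
      refine List.map_congr_left ?_
      intro p hp
      by_cases hpk : p.1 = k
      · have hpv : p.2 = [] := by
          have := PySem.Dict.getD_of_mem_items d (k := p.1) (v := p.2)
            (by simpa using hp) hnd []
          rw [hpk] at this
          rw [List.isEmpty_iff] at hemp
          rw [← this, hemp]
        simp only [Function.comp, hpk, beq_self_eq_true, if_true]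
        simp [hkks, hpk, hpv]
      · have hbk : (p.1 == k) = false := beq_false_of_ne hpk
        simp only [Function.comp, hbk, Bool.false_eq_true, if_false]
        simp [hpk]
    · rw [if_neg hemp]
      rw [ih d hnd hksnd (fun k' hk' => hsub k' (List.mem_cons_of_mem k hk'))]
      refine List.map_congr_left ?_
      intro p hp
      by_cases hpk : p.1 = k
      · have hpv : p.2 = d.getD k [] := by
          have := PySem.Dict.getD_of_mem_items d (k := p.1) (v := p.2)
            (by simpa using hp) hnd []
          rw [hpk] at this
          exact this.symm
        have hpne : ¬ p.2.isEmpty = true := by rw [hpv]; exact hemp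
        simp [hpk, hkks, hpne]
      · simp [hpk]

-- ===== VERDICT (by name: the statement is the Claim_ definition above) =====
theorem get_ordered_dic_spec : Claim_equal_get_ordered_dic := by
  intro e hdom hpre
  have hpre' : ([] : List Int) ∉ e := hpre
  show get_ordered_dic e = get_ordered_dic_alt e
  unfold get_ordered_dic get_ordered_dic_alt
  rw [foldA_eq_foldB e hpre' e (fun x hx => hx) PySem.Dict.empty]
  set D := e.foldl (pvStepB e (pvPos e)) PySem.Dict.empty with hD
  have hnd : D.keys.Nodup :=
    nodup_keys_foldB e (pvPos e) e PySem.Dict.empty (by simp [PySem.Dict.keys_empty])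
  show (D.keys.foldl (fun d' k => if (d'.getD k []).isEmpty then d'.insert k [k] else d') D).items
      = D.items.map (fun kv => (kv.1, if kv.2.isEmpty then [kv.1] else kv.2))
  rw [fixup_items D.keys D hnd hnd (fun k hk => (PySem.Dict.contains_iff_mem_keys D k).mpr hk)]
  refine List.map_congr_left ?_
  intro kv hkv
  have hkmem : kv.1 ∈ D.keys := PySem.Dict.mem_keys_of_mem_items D hkv
  by_cases hemp : kv.2.isEmpty
  · simp [hkmem, hemp]
  · simp [hemp]

@[simp] theorem get_ordered_dic_raises : Claim_raises_get_ordered_dic := by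
  unfold Claim_raises_get_ordered_dic
  exact ⟨fun e _ hr hp => hp hr, by decide⟩
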